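-- pv_equiv track=rewrite | github.com/Nehaattuluri/Nehaattuluri | energy_estimation_app.py | calculate_energy_consumption
-- ===== SOURCE A (Python) =====
-- def calculate_energy_consumption(months, appliances):
--     # Placeholder logic for energy consumption calculation
--     # Replace this with your actual logic
--     energy_consumption = {
--         'Fridge': 100,
--         'Washing Machine': 200,
--         'Air Conditioner': 300,
--         'Oven': 150
--     }
--
--     total_energy = 0
--     for month in months:
--         for appliance in appliances:
--             total_energy += energy_consumption.get(appliance, 0)  # Sum energy consumption for each appliance
--
--     return total_energy
-- ===== SOURCE B (Python) =====
-- def calculate_energy_consumption(months, appliances):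
--     energy_consumption = {
--         'Fridge': 100,
--         'Washing Machine': 200,
--         'Air Conditioner': 300,
--         'Oven': 150
--     }
--     per_month = sum(energy_consumption.get(a, 0) for a in appliances)
--     return len(months) * per_month
-- ===== Notes on version B (the rewrite author's own statement) =====
-- stated objective: faster
-- what changed: B sums the appliance lookups once and multiplies by the number of months instead of re-scanning all appliances for every month.
import Mathlib
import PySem

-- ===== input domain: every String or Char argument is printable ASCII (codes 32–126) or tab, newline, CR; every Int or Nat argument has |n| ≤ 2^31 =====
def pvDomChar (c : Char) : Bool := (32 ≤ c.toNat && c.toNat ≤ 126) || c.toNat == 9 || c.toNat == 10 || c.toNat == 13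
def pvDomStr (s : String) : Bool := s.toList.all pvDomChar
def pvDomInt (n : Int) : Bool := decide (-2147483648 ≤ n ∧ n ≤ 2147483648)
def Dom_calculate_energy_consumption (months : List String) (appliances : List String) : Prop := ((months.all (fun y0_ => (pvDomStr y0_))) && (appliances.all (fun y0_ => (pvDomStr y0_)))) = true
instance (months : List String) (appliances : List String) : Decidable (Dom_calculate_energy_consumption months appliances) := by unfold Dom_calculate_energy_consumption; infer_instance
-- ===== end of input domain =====

-- B replaces A's nested month×appliance loop by one pass over the appliances multiplied
-- by the number of months (faster: asymptotic, O(appliances) instead of O(months·appliances)).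

-- the literal dict both Python versions declare
def pvEnergyDict : PySem.Dict String Int :=
  PySem.Dict.ofList [("Fridge", 100), ("Washing Machine", 200), ("Air Conditioner", 300), ("Oven", 150)]

-- ===== PORT A =====
def calculate_energy_consumption (months : List String) (appliances : List String) : Int :=
  months.foldl (fun total _month =>
    appliances.foldl (fun t appliance => t + pvEnergyDict.getD appliance 0) total) 0

-- ===== PORT B =====
def calculate_energy_consumption_alt (months : List String) (appliances : List String) : Int :=
  (months.length : Int) * (appliances.map (fun a => pvEnergyDict.getD a 0)).sum

-- ===== PRECONDITION & SPEC =====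
def Spec_calculate_energy_consumption (months : List String) (appliances : List String) (out : Int) : Prop := out = calculate_energy_consumption_alt months appliances
instance (months : List String) (appliances : List String) (out : Int) : Decidable (Spec_calculate_energy_consumption months appliances out) := by unfold Spec_calculate_energy_consumption; infer_instance

-- ===== CLAIM (what is proved, stated in full; the proofs are below) =====
def Claim_equal_calculate_energy_consumption : Prop := ∀ (months : List String) (appliances : List String), Dom_calculate_energy_consumption months appliances → Spec_calculate_energy_consumption months appliances (calculate_energy_consumption months appliances)

-- ===== LEMMAS AND PROOFS =====
theorem pv_inner (appliances : List String) (t : Int) :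
    appliances.foldl (fun t a => t + pvEnergyDict.getD a 0) t
      = t + (appliances.map (fun a => pvEnergyDict.getD a 0)).sum := by
  induction appliances generalizing t with
  | nil => simp
  | cons a rest ih => simp [List.foldl, ih]; ring

theorem pv_outer (months : List String) (appliances : List String) (t : Int) :
    months.foldl (fun total _m =>
      appliances.foldl (fun t a => t + pvEnergyDict.getD a 0) total) t
      = t + (months.length : Int) * (appliances.map (fun a => pvEnergyDict.getD a 0)).sum := by
  induction months generalizing t with
  | nil => simp
  | cons m rest ih =>
    simp only [List.foldl]
    rw [pv_inner, ih]
    simp only [List.length_cons]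
    push_cast
    ring

-- ===== VERDICT (by name: the statement is the Claim_ definition above) =====
theorem calculate_energy_consumption_spec : Claim_equal_calculate_energy_consumption := by
  intro months appliances _
  unfold Spec_calculate_energy_consumption calculate_energy_consumption calculate_energy_consumption_alt
  simpa using pv_outer months appliances 0
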